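-- pv_equiv track=rewrite | github.com/westvind/vintel | vi/dotlan.py | convert_regionname
-- ===== SOURCE A (Python) =====
-- def convert_regionname(name):
--     """ Converts a (system)name to the format that dotland uses """
--     converted = []
--     next_upper = False
--     for i, c in enumerate(name):
--         if i == 0:
--             converted.append(c.upper())
--         else:
--             if c in (u" ", u"_"):
--                 c = "_"
--                 next_upper = True
--             else:
--                 if next_upper:
--                     c = c.upper()
--                 else:
--                     c= c.lower()
--                 next_upper = False
--             converted.append(c)
--     return u"".join(converted)
-- ===== SOURCE B (Python) =====
-- def convert_regionname(name):
--     """ Converts a (system)name to the format that dotland uses """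
--     if not name:
--         return u""
--     # one output underscore per separator character; the first chunk of the tail is fully lowercased,
--     # every later chunk is capitalized (first letter upper, rest lower)
--     parts = name[1:].replace(u" ", u"_").split(u"_")
--     words = [parts[0].lower()] + [w[:1].upper() + w[1:].lower() for w in parts[1:]]
--     return name[0].upper() + u"_".join(words)
-- ===== Notes on version B (the rewrite author's own statement) =====
-- stated objective: faster
-- what changed: Replaces the per-character loop with index test and case flag by a declarative pipeline: normalize separators with str.replace, split the tail into chunks, lowercase the first chunk and capitalize the rest, and rejoin with the separator.
import Mathlib
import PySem

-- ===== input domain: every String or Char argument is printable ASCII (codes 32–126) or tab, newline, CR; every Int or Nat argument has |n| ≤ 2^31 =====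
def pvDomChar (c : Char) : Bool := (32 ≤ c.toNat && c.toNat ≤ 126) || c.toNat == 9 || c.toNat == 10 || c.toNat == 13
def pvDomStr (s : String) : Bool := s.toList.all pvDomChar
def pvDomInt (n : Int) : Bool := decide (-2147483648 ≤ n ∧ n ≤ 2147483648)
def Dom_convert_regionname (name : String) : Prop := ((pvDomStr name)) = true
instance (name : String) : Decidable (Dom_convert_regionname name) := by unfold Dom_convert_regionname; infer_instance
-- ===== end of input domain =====

-- B replaces A's per-character flag loop by a replace/split/capitalize/join pipeline (measurably faster in CPython: bulk str methods instead of a per-char loop).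

-- ===== PORT A =====
-- the loop over enumerate(name); `converted` is modelled as the char list "".join produces
def convertLoopA : List (Int × Char) → List Char → Bool → List Char
  | [], conv, _ => conv
  | (i, c) :: rest, conv, next_upper =>
    if i == 0 then convertLoopA rest (conv ++ [PySem.Chars.upperChar c]) next_upper
    else if c == ' ' || c == '_' then convertLoopA rest (conv ++ ['_']) true
    else convertLoopA rest (conv ++ [if next_upper then PySem.Chars.upperChar c else PySem.Chars.lowerChar c]) false

def convert_regionname (name : String) : String :=
  String.mk (convertLoopA (PySem.List.enumerate name.toList) [] false)

-- ===== PORT B =====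
-- w[:1].upper() + w[1:].lower()
def capWordB (w : List Char) : List Char :=
  PySem.Chars.upper (PySem.List.slice w none (some 1)) ++ PySem.Chars.lower (PySem.List.slice w (some 1) none)

def convert_regionname_alt (name : String) : String :=
  let s := name.toList
  if s.isEmpty then "" else
    let parts := PySem.Chars.splitOn (PySem.Chars.replace (PySem.List.slice s (some 1) none) [' '] ['_']) ['_']
    -- parts[0]: split never returns an empty list, so plain head access
    let words := [PySem.Chars.lower (parts.headD [])] ++ parts.tail.map capWordB
    String.mk (PySem.Chars.upper (PySem.List.slice s none (some 1)) ++ PySem.Chars.join ['_'] words)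

-- ===== PRECONDITION & SPEC =====
def Spec_convert_regionname (name : String) (out : String) : Prop := out = convert_regionname_alt name
instance (name : String) (out : String) : Decidable (Spec_convert_regionname name out) := by unfold Spec_convert_regionname; infer_instance

-- ===== CLAIM (what is proved, stated in full; the proofs are below) =====
def Claim_equal_convert_regionname : Prop := ∀ (name : String), Dom_convert_regionname name → Spec_convert_regionname name (convert_regionname name)

-- ===== LEMMAS AND PROOFS =====

-- A's tail behaviour, index-free
def auxA : List Char → Bool → List Char
  | [], _ => []
  | c :: cs, b =>
    if c == ' ' || c == '_' then '_' :: auxA cs true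
    else (if b then PySem.Chars.upperChar c else PySem.Chars.lowerChar c) :: auxA cs false

def subSep (c : Char) : Char := if c = ' ' then '_' else c

def splitU : List Char → List (List Char)
  | [] => [[]]
  | c :: rest =>
    if c = '_' then [] :: splitU rest
    else match splitU rest with
      | [] => [[c]]
      | p :: ps => (c :: p) :: ps

def consPre (pre : List Char) : List (List Char) → List (List Char)
  | [] => [pre]
  | p :: ps => (pre ++ p) :: ps

def glueB (b : Bool) : List (List Char) → List Char
  | [] => []
  | p :: ps =>
    (if b then capWordB p else PySem.Chars.lower p) ++ ps.flatMap (fun w => '_' :: capWordB w)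

theorem splitU_ne_nil (l : List Char) : splitU l ≠ [] := by
  cases l with
  | nil => simp [splitU]
  | cons c rest =>
    simp only [splitU]
    split
    · simp
    · cases h : splitU rest <;> simp

theorem consPre_nil (ps : List (List Char)) (h : ps ≠ []) : consPre [] ps = ps := by
  cases ps with
  | nil => exact absurd rfl h
  | cons p ps => simp [consPre]

theorem replace_go_eq (l acc : List Char) :
    PySem.Chars.replace.go [' '] ['_'] l.length l acc = acc.reverse ++ l.map subSep := by
  induction l generalizing acc with
  | nil => simp [PySem.Chars.replace.go]
  | cons c rest ih =>
    simp only [List.length_cons, PySem.Chars.replace.go, List.isPrefixOf]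
    by_cases h : c = ' '
    · subst h
      rw [if_pos (by simp [List.isPrefixOf])]
      rw [show List.drop ([].length + 1) (' ' :: rest) = rest from rfl, ih]
      simp [subSep]
    · rw [if_neg (by simp [List.isPrefixOf]; exact fun hh => h hh.symm), ih]
      simp [subSep, h]

theorem replace_eq (l : List Char) :
    PySem.Chars.replace l [' '] ['_'] = l.map subSep := by
  have := replace_go_eq l []
  simpa [PySem.Chars.replace] using this

theorem splitOn_go_eq (l : List Char) (fuel : Nat) (cur : List Char) (acc : List (List Char))
    (h : l.length < fuel) :
    PySem.Chars.splitOn.go ['_'] fuel l cur acc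
      = acc.reverse ++ consPre cur.reverse (splitU l) := by
  induction l generalizing fuel cur acc with
  | nil =>
    cases fuel with
    | zero => omega
    | succ f => simp [PySem.Chars.splitOn.go, splitU, consPre]
  | cons c rest ih =>
    cases fuel with
    | zero => omega
    | succ f =>
      have hf : rest.length < f := by simp at h; omega
      by_cases hc : c = '_'
      · subst hc
        rw [show PySem.Chars.splitOn.go ['_'] (f+1) ('_' :: rest) cur acc
              = PySem.Chars.splitOn.go ['_'] f rest [] (cur.reverse :: acc) from by
            simp [PySem.Chars.splitOn.go, List.isPrefixOf]]
        rw [ih f [] (cur.reverse :: acc) hf,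
            show ([] : List Char).reverse = [] from rfl,
            consPre_nil _ (splitU_ne_nil rest)]
        simp [splitU, consPre]
      · rw [show PySem.Chars.splitOn.go ['_'] (f+1) (c :: rest) cur acc
              = PySem.Chars.splitOn.go ['_'] f rest (c :: cur) acc from by
            simp only [PySem.Chars.splitOn.go, List.isPrefixOf]
            rw [if_neg (by simp; exact fun hh => hc hh.symm)]]
        rw [ih f (c :: cur) acc hf]
        simp only [splitU, if_neg hc]
        cases hsp : splitU rest with
        | nil => exact absurd hsp (splitU_ne_nil rest)
        | cons p ps => simp [consPre]

theorem splitOn_eq (l : List Char) :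
    PySem.Chars.splitOn l ['_'] = splitU l := by
  have := splitOn_go_eq l (l.length + 1) [] [] (by omega)
  simpa [PySem.Chars.splitOn, consPre_nil _ (splitU_ne_nil l)] using this

theorem capWordB_cons (c : Char) (p : List Char) :
    capWordB (c :: p) = PySem.Chars.upperChar c :: PySem.Chars.lower p := by
  simp [capWordB, PySem.Chars.upper, PySem.Chars.lower, PySem.List.slice]

theorem auxA_eq_glue (cs : List Char) (b : Bool) :
    auxA cs b = glueB b (splitU (cs.map subSep)) := by
  induction cs generalizing b with
  | nil => simp [auxA, splitU, glueB, capWordB, PySem.Chars.lower, PySem.Chars.upper, PySem.List.slice]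
  | cons c cs ih =>
    by_cases hc : c = ' ' ∨ c = '_'
    · have hsub : subSep c = '_' := by rcases hc with h | h <;> simp [subSep, h]
      have hbeq : (c == ' ' || c == '_') = true := by rcases hc with h | h <;> simp [h]
      simp only [auxA, hbeq, if_pos, List.map_cons, hsub, splitU, if_pos rfl]
      cases hsp : splitU (cs.map subSep) with
      | nil => exact absurd hsp (splitU_ne_nil _)
      | cons p ps =>
        rw [ih true]
        simp [glueB, hsp, capWordB, PySem.Chars.lower, PySem.Chars.upper, PySem.List.slice]
    · push_neg at hc
      have hsub : subSep c = c := by simp [subSep, hc.1]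
      have hbeq : (c == ' ' || c == '_') = false := by simp [hc.1, hc.2]
      simp only [auxA, hbeq, Bool.false_eq_true, if_neg, List.map_cons, hsub, splitU,
        if_neg hc.2]
      cases hsp : splitU (cs.map subSep) with
      | nil => exact absurd hsp (splitU_ne_nil _)
      | cons p ps =>
        rw [ih false]
        simp only [glueB, hsp, capWordB_cons]
        cases b <;>
          simp [glueB, PySem.Chars.lower, capWordB, PySem.Chars.upper, PySem.List.slice]

theorem loopA_enumerate (cs : List Char) (s : Int) (conv : List Char) (b : Bool)
    (hs : 1 ≤ s) :
    convertLoopA (PySem.List.enumerate cs s) conv b = conv ++ auxA cs b := by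
  induction cs generalizing s conv b with
  | nil => simp [PySem.List.enumerate, convertLoopA, auxA]
  | cons c cs ih =>
    rw [PySem.List.enumerate_cons]
    simp only [convertLoopA]
    have h0 : (s == 0) = false := by rw [beq_eq_false_iff_ne]; omega
    rw [if_neg (by rw [h0]; exact Bool.false_ne_true)]
    by_cases hc : (c == ' ' || c == '_') = true
    · rw [if_pos hc, ih (s + 1) _ true (by omega)]
      simp [auxA, hc]
    · rw [if_neg hc, ih (s + 1) _ false (by omega)]
      simp only [auxA]
      rw [if_neg hc]
      simp

theorem join_cons_map (x : List Char) (ps : List (List Char)) :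
    PySem.Chars.join ['_'] (x :: ps) = x ++ ps.flatMap (fun w => '_' :: w) := by
  induction ps generalizing x with
  | nil => simp [PySem.Chars.join, List.intercalate]
  | cons p ps ih =>
    have : PySem.Chars.join ['_'] (x :: p :: ps)
        = x ++ ['_'] ++ PySem.Chars.join ['_'] (p :: ps) := by
      simp [PySem.Chars.join, List.intercalate, List.intersperse]
    rw [this, ih]
    simp

-- ===== VERDICT (by name: the statement is the Claim_ definition above) =====
theorem convert_regionname_spec : Claim_equal_convert_regionname := by
  intro name _
  unfold Spec_convert_regionname convert_regionname convert_regionname_alt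
  cases h : name.toList with
  | nil =>
    simp only [h, PySem.List.enumerate, convertLoopA, List.isEmpty_nil, if_true]
    rfl
  | cons c cs =>
    simp only [h, List.isEmpty_cons, Bool.false_eq_true, if_false]
    rw [PySem.List.enumerate_cons]
    simp only [convertLoopA]
    rw [if_pos (by decide), loopA_enumerate cs (0 + 1) _ false (by omega)]
    have hslice1 : PySem.List.slice (c :: cs) (some 1) none = cs := by
      simp [PySem.List.slice]
    have hslice0 : PySem.List.slice (c :: cs) none (some 1) = [c] := by
      simp [PySem.List.slice]
    rw [hslice1, hslice0, replace_eq, splitOn_eq]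
    cases hsp : splitU (cs.map subSep) with
    | nil => exact absurd hsp (splitU_ne_nil _)
    | cons p ps =>
      simp only [List.headD_cons, List.tail_cons]
      rw [show [PySem.Chars.lower p] ++ (ps.map capWordB) = PySem.Chars.lower p :: ps.map capWordB from rfl]
      rw [join_cons_map]
      rw [auxA_eq_glue cs false, hsp]
      simp [glueB, PySem.Chars.upper, List.flatMap_map]
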